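-- pv_equiv track=rewrite | github.com/xuyw-seu/ByteDance | tools/time_sequence_analysis/traffic_time_sequence_burst_detector.py | merge_min_elements
-- ===== SOURCE A (Python) =====
-- def merge_min_elements(original_list, n):
--     m = len(original_list)
--
--     if m <= n:
--         # 如果原始列表元素个数小于等于目标列表元素个数，直接返回原始列表的拷贝
--         return original_list.copy()
--
--     # 找到最小的 m-n 个元素的索引
--     min_indices = sorted(range(m), key=lambda i: original_list[i])[:m-n]
--
--     # 构建新的列表，将最小的 m-n 个元素合并到左边或右边的元素上
--     new_list = original_list.copy()
--     for i in sorted(min_indices, reverse=True):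
--         if i == 0:
--             # 如果最小的元素是第一个数，合并到右边
--             new_list[i] += new_list.pop(i + 1)
--         else:
--             # 合并到左边
--             new_list[i - 1] += new_list.pop(i)
--     return new_list
-- ===== SOURCE B (Python) =====
-- def merge_min_elements(original_list, n):
--     m = len(original_list)
--     if m <= n:
--         return original_list.copy()
--     # indices of the m-n smallest values (stable: ties resolved by index, as in A)
--     order = sorted(range(m), key=lambda i: original_list[i])
--     min_set = set(order[:m - n])
--     # single right-to-left pass: each run of min elements is carried into the
--     # survivor on its left; a run reaching index 0 is folded into the first survivor
--     res = []
--     carry = 0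
--     for i in range(m - 1, -1, -1):
--         if i in min_set:
--             carry += original_list[i]
--             if i == 0:
--                 res[-1] += carry
--         else:
--             res.append(original_list[i] + carry)
--             carry = 0
--     return res[::-1]
-- ===== Notes on version B (the rewrite author's own statement) =====
-- stated objective: faster
-- what changed: Replaces A's repeated new_list.pop cascade (each pop shifts the list) by computing the min-index set once and doing a single right-to-left pass that accumulates each run of min elements into the surviving neighbor.
import Mathlib
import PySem

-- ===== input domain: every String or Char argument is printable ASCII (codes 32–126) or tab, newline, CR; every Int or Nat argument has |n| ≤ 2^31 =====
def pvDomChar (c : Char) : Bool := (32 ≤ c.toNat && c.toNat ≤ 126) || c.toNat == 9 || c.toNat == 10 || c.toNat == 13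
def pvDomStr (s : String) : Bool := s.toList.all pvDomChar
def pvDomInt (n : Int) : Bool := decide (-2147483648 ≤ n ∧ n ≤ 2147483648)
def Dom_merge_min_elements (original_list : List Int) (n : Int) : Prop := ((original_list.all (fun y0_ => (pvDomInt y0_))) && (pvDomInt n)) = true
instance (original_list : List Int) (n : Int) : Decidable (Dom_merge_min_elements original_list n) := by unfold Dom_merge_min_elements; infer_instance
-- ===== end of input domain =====

-- B replaces A's repeated list.pop cascade by a min-index set plus one right-to-left
-- accumulation pass (objective: faster; a timing run measures the speed-up).
-- ===== PORT A =====
-- one iteration of A's merging loop: new_list[i] += new_list.pop(i+1)  /  new_list[i-1] += new_list.pop(i)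
def stepA (nl : List Int) (i : Int) : List Int :=
  if i == 0 then
    match PySem.List.pop? nl (i + 1) with
    | some (v, nl') => PySem.List.pySetD nl' i (PySem.List.pyGetD nl i 0 + v)
    | none => nl   -- IndexError in Python (outside Pre_)
  else
    match PySem.List.pop? nl i with
    | some (v, nl') => PySem.List.pySetD nl' (i - 1) (PySem.List.pyGetD nl (i - 1) 0 + v)
    | none => nl   -- IndexError in Python (outside Pre_)

def merge_min_elements (original_list : List Int) (n : Int) : List Int :=
  let m : Int := original_list.length
  if m ≤ n then original_list
  else
    let min_indices := PySem.List.slice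
      (PySem.List.sorted (PySem.List.pyRange 0 m 1) (fun i => PySem.List.pyGetD original_list i 0) false)
      none (some (m - n))
    (PySem.List.sorted min_indices (fun i => i) true).foldl stepA original_list

-- ===== PORT B =====
-- one iteration of B's right-to-left pass (state: (res, carry))
def stepB (original_list : List Int) (min_set : PySem.Set Int) (st : List Int × Int) (i : Int) : List Int × Int :=
  if i ∈ min_set then
    let carry := st.2 + PySem.List.pyGetD original_list i 0
    if i == 0 then
      (PySem.List.pySetD st.1 (-1) (PySem.List.pyGetD st.1 (-1) 0 + carry), carry)  -- res[-1] += carry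
    else (st.1, carry)
  else (st.1 ++ [PySem.List.pyGetD original_list i 0 + st.2], 0)

def merge_min_elements_alt (original_list : List Int) (n : Int) : List Int :=
  let m : Int := original_list.length
  if m ≤ n then original_list
  else
    let order := PySem.List.sorted (PySem.List.pyRange 0 m 1) (fun i => PySem.List.pyGetD original_list i 0) false
    let min_set := PySem.Set.ofList (PySem.List.slice order none (some (m - n)))
    let p := (PySem.List.pyRange (m - 1) (-1) (-1)).foldl (stepB original_list min_set) ([], 0)
    (PySem.List.slice? p.1 none none (-1)).getD []   -- res[::-1]

-- ===== PRECONDITION & SPEC =====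
-- Pre_ excludes exactly the inputs where Python A raises IndexError (pop past the end):
-- a nonempty list with n ≤ 0, where every element is a "min" element and no survivor remains.
def Pre_merge_min_elements (original_list : List Int) (n : Int) : Prop :=
  original_list = [] ∨ 1 ≤ n
instance (original_list : List Int) (n : Int) : Decidable (Pre_merge_min_elements original_list n) := by
  unfold Pre_merge_min_elements; infer_instance

def pvWitness_merge_min_elements : List Int × Int := ([5, 1, 2], 2)

def Spec_merge_min_elements (original_list : List Int) (n : Int) (out : List Int) : Prop := out = merge_min_elements_alt original_list n
instance (original_list : List Int) (n : Int) (out : List Int) : Decidable (Spec_merge_min_elements original_list n out) := by unfold Spec_merge_min_elements; infer_instance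

-- ===== CLAIM (what is proved, stated in full; the proofs are below) =====
def Claim_equal_merge_min_elements : Prop := ∀ (original_list : List Int) (n : Int), Dom_merge_min_elements original_list n → Pre_merge_min_elements original_list n → Spec_merge_min_elements original_list n (merge_min_elements original_list n)

-- ===== LEMMAS AND PROOFS =====

-- the common specification: a list zipped with "is a min index" flags, merged.
-- goSpec: inside the list, each run of flagged elements is added into the survivor opening its block.
def goSpec (acc : Int) : List (Int × Bool) → List Int
  | [] => [acc]
  | (x, b) :: r => if b then goSpec (acc + x) r else acc :: goSpec x r

def addHead (v : Int) : List Int → List Int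
  | [] => [v]
  | h :: t => (v + h) :: t

def topSpec : List (Int × Bool) → List Int
  | [] => []
  | (x, b) :: r => if b then addHead x (topSpec r) else goSpec x r

-- zip a list with membership flags of a set of (absolute) indices, starting at offset ofs
def zipMaskO (ofs : Int) (l : List Int) (d : List Int) : List (Int × Bool) :=
  match l with
  | [] => []
  | x :: xs => (x, decide (ofs ∈ d)) :: zipMaskO (ofs + 1) xs d

-- merging position j (1 ≤ j < length) into position j-1
def mergeAt (l : List Int) (j : Nat) : List Int :=
  (l.eraseIdx j).set (j - 1) (l.getD (j - 1) 0 + l.getD j 0)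

-- the state (res, carry) of B's right-to-left pass over a zipped suffix
def specPair : List (Int × Bool) → List Int × Int
  | [] => ([], 0)
  | (x, b) :: r =>
      if b then ((specPair r).1, (specPair r).2 + x)
      else ((specPair r).1 ++ [x + (specPair r).2], 0)

theorem addHead_addHead (a b : Int) (s : List Int) :
    addHead a (addHead b s) = addHead (a + b) s := by
  cases s with
  | nil => simp [addHead]
  | cons h t => simp [addHead]; ring
theorem zipMaskO_false (l : List Int) (ofs : Int) (d : List Int)
    (h : ∀ i ∈ d, i < ofs) : zipMaskO ofs l d = l.map (fun x => (x, false)) := by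
  induction l generalizing ofs with
  | nil => rfl
  | cons x xs ih =>
      have hx : ofs ∉ d := fun hm => absurd (h ofs hm) (lt_irrefl _)
      simp [zipMaskO, hx, ih (ofs + 1) (fun i hi => lt_trans (h i hi) (by omega))]

theorem goSpec_false (l : List Int) (acc : Int) :
    goSpec acc (l.map (fun x => (x, false))) = acc :: l := by
  induction l generalizing acc with
  | nil => rfl
  | cons x xs ih => simp [goSpec, ih]

theorem topSpec_false (l : List Int) :
    topSpec (l.map (fun x => (x, false))) = l := by
  cases l with
  | nil => rfl
  | cons x xs => simp [topSpec, goSpec_false]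

theorem mergeAt_cons (x : Int) (xs : List Int) (k : Nat) (hk : 2 ≤ k) :
    mergeAt (x :: xs) k = x :: mergeAt xs (k - 1) := by
  obtain ⟨k', rfl⟩ : ∃ k', k = k' + 2 := ⟨k - 2, by omega⟩
  simp [mergeAt, List.eraseIdx, List.getD]

theorem mergeAt_one (x y : Int) (rest : List Int) :
    mergeAt (x :: y :: rest) 1 = (x + y) :: rest := by
  simp [mergeAt, List.eraseIdx, List.getD]

theorem length_mergeAt (l : List Int) (j : Nat) (h : j < l.length) :
    (mergeAt l j).length = l.length - 1 := by
  simp [mergeAt, List.length_eraseIdx]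
  omega

theorem transfer_go (l : List Int) (ofs j : Int) (d : List Int) (acc : Int)
    (h1 : ofs + 1 ≤ j) (h2 : j < ofs + l.length) (h3 : ∀ i ∈ d, i < j) :
    goSpec acc (zipMaskO ofs l (j :: d)) =
      goSpec acc (zipMaskO ofs (mergeAt l (j - ofs).toNat) d) := by
  induction l generalizing ofs acc with
  | nil => simp at h2; omega
  | cons x xs ih =>
      have hne : ofs ≠ j := by omega
      have hflag : decide (ofs ∈ j :: d) = decide (ofs ∈ d) := by simp [hne]
      by_cases hj : j = ofs + 1
      · subst hj
        cases xs with
        | nil => simp at h2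
        | cons y rest =>
            rw [show (ofs + 1 - ofs).toNat = 1 by omega, mergeAt_one]
            have e1 : zipMaskO (ofs + 1 + 1) rest ((ofs + 1) :: d) = rest.map (fun v => (v, false)) :=
              zipMaskO_false _ _ _ (by
                intro i hi
                rcases List.mem_cons.mp hi with rfl | hi
                · omega
                · have := h3 i hi; omega)
            have e2 : zipMaskO (ofs + 1) rest d = rest.map (fun v => (v, false)) :=
              zipMaskO_false _ _ _ (fun i hi => by have := h3 i hi; omega)
            simp only [zipMaskO, hflag, e1, e2]
            have ht : decide ((ofs + 1 : Int) ∈ (ofs + 1) :: d) = true := by simp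
            rw [ht]
            by_cases hm : ofs ∈ d <;>
              simp [hm, goSpec, goSpec_false] <;> ring_nf
      · have hk2 : 2 ≤ (j - ofs).toNat := by omega
        rw [mergeAt_cons _ _ _ hk2, show (j - ofs).toNat - 1 = (j - (ofs + 1)).toNat by omega]
        simp only [zipMaskO, hflag]
        have ih' := fun acc' => ih (ofs + 1) acc' (by omega) (by simp at h2 ⊢; omega)
        by_cases hm : ofs ∈ d <;> simp only [hm, decide_true, decide_false, goSpec] <;>
          simp [ih']

theorem transfer_top (l : List Int) (ofs j : Int) (d : List Int)
    (h1 : ofs + 1 ≤ j) (h2 : j < ofs + l.length) (h3 : ∀ i ∈ d, i < j) :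
    topSpec (zipMaskO ofs l (j :: d)) =
      topSpec (zipMaskO ofs (mergeAt l (j - ofs).toNat) d) := by
  induction l generalizing ofs with
  | nil => simp at h2; omega
  | cons x xs ih =>
      have hne : ofs ≠ j := by omega
      have hflag : decide (ofs ∈ j :: d) = decide (ofs ∈ d) := by simp [hne]
      by_cases hj : j = ofs + 1
      · subst hj
        cases xs with
        | nil => simp at h2
        | cons y rest =>
            rw [show (ofs + 1 - ofs).toNat = 1 by omega, mergeAt_one]
            have e1 : zipMaskO (ofs + 1 + 1) rest ((ofs + 1) :: d) = rest.map (fun v => (v, false)) :=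
              zipMaskO_false _ _ _ (by
                intro i hi
                rcases List.mem_cons.mp hi with rfl | hi
                · omega
                · have := h3 i hi; omega)
            have e2 : zipMaskO (ofs + 1) rest d = rest.map (fun v => (v, false)) :=
              zipMaskO_false _ _ _ (fun i hi => by have := h3 i hi; omega)
            simp only [zipMaskO, hflag, e1, e2]
            have ht : decide ((ofs + 1 : Int) ∈ (ofs + 1) :: d) = true := by simp
            rw [ht]
            by_cases hm : ofs ∈ d <;>
              simp [hm, topSpec, goSpec, goSpec_false, topSpec_false, addHead_addHead]
      · have hk2 : 2 ≤ (j - ofs).toNat := by omega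
        rw [mergeAt_cons _ _ _ hk2, show (j - ofs).toNat - 1 = (j - (ofs + 1)).toNat by omega]
        simp only [zipMaskO, hflag]
        have h2' : j < ofs + 1 + (xs.length : Int) := by simp at h2 ⊢; omega
        have ihtop := ih (ofs + 1) (by omega) h2'
        have ihgo := fun acc' => transfer_go xs (ofs + 1) j d acc' (by omega) h2' h3
        by_cases hm : ofs ∈ d <;> simp only [hm, decide_true, decide_false, topSpec] <;>
          simp [ihtop, ihgo]

theorem stepA_eq_mergeAt (l : List Int) (j : Int) (h1 : 1 ≤ j) (h2 : j < l.length) :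
    stepA l j = mergeAt l j.toNat := by
  obtain ⟨k, rfl⟩ : ∃ k : Nat, j = (k : Int) := ⟨j.toNat, by omega⟩
  have hj0 : ((k : Int) == 0) = false := by simp; omega
  have hlt : k < l.length := by exact_mod_cast h2
  simp only [stepA, hj0, Bool.false_eq_true, if_false]
  rw [show ((k:Int)).toNat = k from Int.toNat_natCast k, PySem.List.pop?_natCast l k hlt]
  have hc1 : (k : Int) - 1 = ((k - 1 : Nat) : Int) := by omega
  rw [hc1]
  simp only [PySem.List.pySetD_natCast, PySem.List.pyGetD_natCast]
  rw [mergeAt, List.getD_eq_getElem l 0 hlt]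

theorem Aside (d l : List Int)
    (hp : d.Pairwise (fun a b => b < a))
    (hb : ∀ i ∈ d, 0 ≤ i ∧ i < (l.length : Int))
    (hl : d.length + 1 ≤ l.length) :
    d.foldl stepA l = topSpec (zipMaskO 0 l d) := by
  induction d generalizing l with
  | nil =>
      rw [List.foldl_nil, zipMaskO_false l 0 [] (by simp), topSpec_false]
  | cons j d' ih =>
      have hbj := hb j (List.mem_cons_self ..)
      have hd' := (List.pairwise_cons.mp hp).1
      by_cases hj1 : 1 ≤ j
      · rw [List.foldl_cons, stepA_eq_mergeAt l j hj1 hbj.2]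
        have hlen : (mergeAt l j.toNat).length = l.length - 1 :=
          length_mergeAt l j.toNat (by omega)
        rw [ih (mergeAt l j.toNat) (List.Pairwise.of_cons hp)
              (fun i hi => ⟨(hb i (List.mem_cons_of_mem _ hi)).1, by
                have := hd' i hi; rw [hlen]; omega⟩)
              (by simp at hl ⊢; omega)]
        have := transfer_top l 0 j d' (by omega) (by omega) hd'
        rw [Int.sub_zero] at this
        exact this.symm
      · have hj : j = 0 := by omega
        subst hj
        have hd'nil : d' = [] := by
          cases d' with
          | nil => rfl
          | cons a t =>
              have h1 := hd' a (List.mem_cons_self ..)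
              have h2 := (hb a (by simp)).1
              omega
        subst hd'nil
        match l, hl with
        | x :: y :: rest, _ =>
            have e1 : zipMaskO (0 + 1 + 1) rest [(0 : Int)] = rest.map (fun v => (v, false)) :=
              zipMaskO_false _ _ _ (by intro i hi; simp at hi; omega)
            rw [List.foldl_cons, List.foldl_nil]
            simp only [zipMaskO, e1]
            norm_num
            simp [stepA, topSpec, goSpec, goSpec_false, addHead,
              PySem.List.pop?, PySem.List.pySetD, PySem.List.pySet?,
              PySem.List.pyGetD, PySem.List.pyGet?, PySem.List.pyIdx?]
            have hpos : (0 : Int) ≤ (rest.length : Int) + 1 := by positivity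
            simp [hpos]

set_option maxRecDepth 4000 in
theorem Bfold (l : List Int) (s : PySem.Set Int) (fuel a : Nat) (hf : l.length ≤ a + fuel) (ha : 1 ≤ a) :
    List.foldr (fun i st => stepB l s st i) ([], 0) (PySem.List.pyRange (a : Int) (l.length : Int) 1) =
      specPair (zipMaskO (a : Int) (l.drop a) s) := by
  induction fuel generalizing a with
  | zero =>
      have hle : l.length ≤ a := by omega
      rw [PySem.List.pyRange_one_eq_nil (by exact_mod_cast hle),
        List.drop_of_length_le hle]
      rfl
  | succ fuel ih =>
      by_cases hlt : a < l.length
      · rw [PySem.List.pyRange_one_cons (by exact_mod_cast hlt), List.foldr_cons]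
        have hcast : (a : Int) + 1 = ((a + 1 : Nat) : Int) := by push_cast; ring
        rw [hcast, ih (a + 1) (by omega) (by omega)]
        rw [List.drop_eq_getElem_cons hlt]
        have hz : ((a : Int) == 0) = false := by simp; omega
        have hget : PySem.List.pyGetD l (a : Int) 0 = l[a] := by
          rw [PySem.List.pyGetD_natCast, List.getD_eq_getElem l 0 hlt]
        by_cases hms : (a : Int) ∈ s <;>
          simp [stepB, hms, hz, hget, specPair, zipMaskO]
      · have hle : l.length ≤ a := by omega
        rw [PySem.List.pyRange_one_eq_nil (by exact_mod_cast hle),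
          List.drop_of_length_le hle]
        rfl

theorem specPair_go (z : List (Int × Bool)) (acc : Int) :
    ((specPair z).1 ++ [acc + (specPair z).2]).reverse = goSpec acc z := by
  induction z generalizing acc with
  | nil => simp [specPair, goSpec]
  | cons p r ih =>
      obtain ⟨x, b⟩ := p
      cases b with
      | true =>
          simp only [specPair, if_true, goSpec]
          rw [show acc + ((specPair r).2 + x) = (acc + x) + (specPair r).2 by ring]
          exact ih (acc + x)
      | false =>
          simp only [specPair, goSpec, Bool.false_eq_true, if_false]
          rw [← ih x]
          simp
theorem specPair_top (z : List (Int × Bool)) (h : (specPair z).1 ≠ []) :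
    topSpec z = addHead (specPair z).2 ((specPair z).1.reverse) := by
  induction z with
  | nil => simp [specPair] at h
  | cons p r ih =>
      obtain ⟨x, b⟩ := p
      cases b with
      | true =>
          have hr : (specPair r).1 ≠ [] := by simpa [specPair] using h
          simp only [topSpec, specPair, if_true]
          rw [ih hr, addHead_addHead, Int.add_comm]
      | false =>
          simp only [topSpec, specPair, Bool.false_eq_true, if_false]
          rw [← specPair_go r x]
          simp [addHead]
theorem specPair_ne (z : List (Int × Bool)) (h : ∃ p ∈ z, p.2 = false) :
    (specPair z).1 ≠ [] := by
  induction z with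
  | nil => simp at h
  | cons p r ih =>
      obtain ⟨x, b⟩ := p
      cases b with
      | false => simp [specPair]
      | true =>
          rcases h with ⟨q, hq, hq2⟩
          rcases List.mem_cons.mp hq with rfl | hq'
          · simp at hq2
          · simpa [specPair] using ih ⟨q, hq', hq2⟩

theorem zipMaskO_exists_false (l : List Int) (ofs : Int) (d : List Int) (i : Int)
    (h1 : ofs ≤ i) (h2 : i < ofs + l.length) (h3 : i ∉ d) :
    ∃ p ∈ zipMaskO ofs l d, p.2 = false := by
  induction l generalizing ofs with
  | nil => simp at h2; omega
  | cons x xs ih =>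
      by_cases hio : i = ofs
      · subst hio
        exact ⟨(x, decide (i ∈ d)), by simp [zipMaskO], by simpa using h3⟩
      · obtain ⟨p, hp, hp2⟩ := ih (ofs + 1) (by omega) (by simp at h2; omega)
        exact ⟨p, by simp [zipMaskO]; right; exact hp, hp2⟩

theorem setLast_reverse (res : List Int) (c : Int) (h : res ≠ []) :
    (PySem.List.pySetD res (-1) (PySem.List.pyGetD res (-1) 0 + c)).reverse =
      addHead c res.reverse := by
  rcases List.eq_nil_or_concat res with rfl | ⟨ys, y, rfl⟩
  · exact absurd rfl h
  · simp only [List.concat_eq_append]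
    have hg : PySem.List.pyGetD (ys ++ [y]) (-1) 0 = y := by
      simp [PySem.List.pyGetD, PySem.List.pyGet?, PySem.List.pyIdx?]
    rw [hg]
    simp [PySem.List.pySetD, PySem.List.pySet?, PySem.List.pyIdx?, addHead]
    ring

theorem zipMaskO_congr (l : List Int) (ofs : Int) (d e : List Int)
    (h : ∀ i : Int, i ∈ d ↔ i ∈ e) : zipMaskO ofs l d = zipMaskO ofs l e := by
  induction l generalizing ofs with
  | nil => rfl
  | cons x xs ih => simp [zipMaskO, ih (ofs + 1)]; exact h ofs

-- ===== VERDICT (by name: the statement is the Claim_ definition above) =====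
theorem merge_min_elements_spec : Claim_equal_merge_min_elements := by
  intro l n _ hpre
  unfold Spec_merge_min_elements
  by_cases hmn : ((l.length : Int)) ≤ n
  · unfold merge_min_elements merge_min_elements_alt
    rw [if_pos hmn, if_pos hmn]
  rcases hpre with rfl | hn
  · -- empty list: both sides compute to []
    have hn' : n < 0 := by simpa using hmn
    unfold merge_min_elements merge_min_elements_alt
    rw [if_neg hmn, if_neg hmn]
    rw [PySem.List.pyRange_one_eq_nil (by simp)]
    rw [show ((List.length ([] : List Int) : Int)) - 1 = -1 by simp]
    rw [PySem.List.pyRange_neg_one_eq_nil (by norm_num)]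
    rw [PySem.List.slice_to _ (by simp; omega)]
    simp only [PySem.List.slice?_none_none_neg_one]
    have hsnil : ∀ (key : Int → Int) (rev : Bool), PySem.List.sorted ([] : List Int) key rev = [] :=
      fun k r => (PySem.List.sorted_eq_nil_iff _ _ _).mpr rfl
    simp [hsnil]
  · -- nonempty list, 1 ≤ n < length
    cases l with
    | nil => simp at hmn; omega
    | cons x xs =>
    set l := x :: xs with hl
    have hm1 : 1 ≤ (l.length : Int) := by simp [hl]
    have hnm : n < (l.length : Int) := by omega
    set m : Int := (l.length : Int) with hm
    set key := fun i => PySem.List.pyGetD l i 0 with hkey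
    set order := PySem.List.sorted (PySem.List.pyRange 0 m 1) key false with horder
    set t := PySem.List.slice order none (some (m - n)) with ht
    set s := PySem.Set.ofList t with hs
    set d := PySem.List.sorted t (fun i => i) true with hd
    -- facts about order
    have horder_len : order.length = l.length := by
      rw [horder, PySem.List.length_sorted, PySem.List.length_pyRange_one]; omega
    have horder_mem : ∀ i : Int, i ∈ order ↔ (0 ≤ i ∧ i < m) := by
      intro i
      rw [horder, PySem.List.mem_sorted, PySem.List.mem_pyRange_one]
    have horder_nodup : order.Nodup := by
      rw [horder]
      exact (PySem.List.sorted_perm ..).nodup_iff.mpr (PySem.List.nodup_pyRange_one ..)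
    -- facts about t
    have htake : t = order.take (m - n).toNat := PySem.List.slice_to order (by omega)
    have ht_mem : ∀ i ∈ t, 0 ≤ i ∧ i < m := fun i hi =>
      (horder_mem i).mp (List.take_subset _ _ (htake ▸ hi))
    have ht_nodup : t.Nodup := htake ▸ (List.take_sublist _ _).nodup horder_nodup
    have ht_len : t.length ≤ l.length - 1 := by
      rw [htake]
      have := List.length_take_le (m - n).toNat order
      have h2 : (m - n).toNat ≤ l.length - 1 := by omega
      omega
    -- facts about d
    have hd_mem : ∀ i : Int, i ∈ d ↔ i ∈ t := fun i => by rw [hd, PySem.List.mem_sorted]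
    have hd_nodup : d.Nodup := (PySem.List.sorted_perm ..).nodup_iff.mpr ht_nodup
    have hd_pair : d.Pairwise (fun a b => b < a) := by
      have h1 : d.Pairwise (fun a b => b ≤ a) := PySem.List.sorted_pairwise_rev ..
      exact (h1.and hd_nodup).imp (fun {a b} ⟨hab, hne⟩ => lt_of_le_of_ne hab (Ne.symm hne))
    have hd_len : d.length = t.length := by rw [hd, PySem.List.length_sorted]
    -- A-side
    have hA : merge_min_elements l n = topSpec (zipMaskO 0 l t) := by
      have : merge_min_elements l n = d.foldl stepA l := by
        unfold merge_min_elements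
        rw [if_neg hmn]
      rw [this, Aside d l hd_pair (fun i hi => ht_mem i ((hd_mem i).mp hi)) (by omega),
        zipMaskO_congr l 0 d t hd_mem]
    -- B-side
    have hs_mem : ∀ i : Int, i ∈ s ↔ i ∈ t := fun i => PySem.Set.mem_ofList ..
    have hB : merge_min_elements_alt l n = topSpec (zipMaskO 0 l s) := by
      have hBdef : merge_min_elements_alt l n =
          (PySem.List.slice? ((PySem.List.pyRange (m - 1) (-1) (-1)).foldl (stepB l s) ([], 0)).1
            none none (-1)).getD [] := by
        unfold merge_min_elements_alt
        rw [if_neg hmn]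
      rw [hBdef, PySem.List.slice?_none_none_neg_one, Option.getD_some]
      have hrev : PySem.List.pyRange (m - 1) (-1) (-1) = (PySem.List.pyRange 0 m 1).reverse := by
        rw [PySem.List.pyRange_neg_one_eq_reverse]
        norm_num
      rw [hrev, List.foldl_reverse]
      rw [PySem.List.pyRange_one_cons (by omega), List.foldr_cons]
      rw [show (0 : Int) + 1 = ((1 : Nat) : Int) by norm_num]
      rw [show m = ((l.length : Nat) : Int) from hm]
      rw [Bfold l s l.length 1 (by omega) (le_refl 1)]
      simp only [Nat.cast_one]
      have hxs : l.drop 1 = xs := by rw [hl]; rfl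
      have hz1 : zipMaskO 0 l s = (x, decide ((0 : Int) ∈ s)) :: zipMaskO 1 xs s := by
        rw [hl]; simp [zipMaskO]
      by_cases h0s : (0 : Int) ∈ s
      · -- first element is a min index: res[-1] += carry
        have hfalse : ∃ p ∈ zipMaskO 1 xs s, p.2 = false := by
          by_contra hc
          simp only [not_exists, not_and] at hc
          have hsub : PySem.List.pyRange 0 m 1 ⊆ t := by
            intro i hi
            rw [PySem.List.mem_pyRange_one] at hi
            by_cases hi0 : i = 0
            · subst hi0; exact (hs_mem 0).mp h0s
            · have h1i : 1 ≤ i := by omega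
              have hlt : i < 1 + (xs.length : Int) := by
                have hmx : m = 1 + (xs.length : Int) := by rw [hm, hl]; push_cast [List.length_cons]; omega
                omega
              by_contra hit
              have hnis : i ∉ s := fun hin => hit ((hs_mem i).mp hin)
              obtain ⟨p, hp, hpf⟩ := zipMaskO_exists_false xs 1 s i h1i hlt hnis
              exact absurd hpf (by simp [hc p hp])
          have := (List.subperm_of_subset (PySem.List.nodup_pyRange_one ..) hsub).length_le
          rw [PySem.List.length_pyRange_one] at this
          omega
        have hres : (specPair (zipMaskO 1 xs s)).1 ≠ [] := specPair_ne _ hfalse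
        simp only [stepB, if_pos h0s, hxs, beq_self_eq_true, if_true]
        rw [setLast_reverse _ _ hres]
        rw [hz1, topSpec]
        simp only [h0s, decide_true, if_true]
        rw [specPair_top _ hres, addHead_addHead]
        have hgx : PySem.List.pyGetD l 0 0 = x := by rw [hl]; simp [PySem.List.pyGetD, PySem.List.pyGet?, PySem.List.pyIdx?]
        rw [hgx, show (specPair (zipMaskO 1 xs s)).2 + x = x + (specPair (zipMaskO 1 xs s)).2 by ring]
      · -- first element survives
        simp only [stepB, if_neg h0s, hxs]
        rw [specPair_go (zipMaskO 1 xs s) (PySem.List.pyGetD l 0 0)]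
        rw [hz1, topSpec]
        simp only [h0s, decide_false, Bool.false_eq_true, if_false]
        have : PySem.List.pyGetD l 0 0 = x := by rw [hl]; simp [PySem.List.pyGetD, PySem.List.pyGet?, PySem.List.pyIdx?]
        rw [this]
    rw [hA, hB, zipMaskO_congr l 0 s t (fun i => (hs_mem i))]
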